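-- pv_equiv track=rewrite | github.com/rsirefelt/advent_of_code | 2021/dec08/joakim_loefgren/day8.py | deduce_from_147
-- ===== SOURCE A (Python) =====
-- def deduce_from_147(digits):
--     """ numbers 1, 4, 7 """
--     clues_raw = {
--         'cf': set(next(d for d in iter(digits) if len(d) == 2)),
--         'acf': set(next(d for d in iter(digits) if len(d) == 3)),
--         'bcdf': set(next(d for d in iter(digits) if len(d) == 4)),
--     }
--     clues = {
--         'a': clues_raw['acf'] - clues_raw['cf'],
--         'cf': clues_raw['cf'],
--         'bd': clues_raw['bcdf'] - clues_raw['cf']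
--     }
--     return clues
-- ===== SOURCE B (Python) =====
-- def deduce_from_147(digits):
--     """ numbers 1, 4, 7 """
--     # One pass: remember the FIRST pattern seen for each length, then read off 2/3/4.
--     by_len = {}
--     for d in digits:
--         n = len(d)
--         if n not in by_len:
--             by_len[n] = set(d)
--     cf = by_len[2]
--     return {'a': by_len[3] - cf, 'cf': cf, 'bd': by_len[4] - cf}
-- ===== Notes on version B (the rewrite author's own statement) =====
-- stated objective: simpler
-- what changed: Replaces A's three separate generator searches over digits by a single pass that records the first pattern of each length in a dict, then reads lengths 2/3/4 off the dict.
import Mathlib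
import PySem

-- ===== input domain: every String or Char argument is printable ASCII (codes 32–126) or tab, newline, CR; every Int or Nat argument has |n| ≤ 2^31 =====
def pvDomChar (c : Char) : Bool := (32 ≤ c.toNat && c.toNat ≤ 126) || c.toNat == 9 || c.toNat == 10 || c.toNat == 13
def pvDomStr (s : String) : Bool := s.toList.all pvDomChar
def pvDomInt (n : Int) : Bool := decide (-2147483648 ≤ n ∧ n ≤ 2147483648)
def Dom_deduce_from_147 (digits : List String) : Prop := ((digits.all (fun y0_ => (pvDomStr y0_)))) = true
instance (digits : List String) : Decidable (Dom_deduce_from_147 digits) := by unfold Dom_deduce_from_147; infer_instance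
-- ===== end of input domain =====

-- B replaces A's three generator searches over `digits` by one pass recording the first
-- pattern of each length in a dict (objective: simpler); same return value on Pre_.

-- ===== PORT A =====
-- next(d for d in digits if len(d)==k): first match; the .getD "" default is never used
-- on Pre_ (Python raises StopIteration exactly when find? is none — excluded by Pre_).
def deduce_from_147 (digits : List String) : List (String × List String) :=
  let cfRaw := PySem.Set.ofList (((digits.find? (fun d => PySem.Str.len d == 2)).getD "").toList.map Char.toString)
  let acfRaw := PySem.Set.ofList (((digits.find? (fun d => PySem.Str.len d == 3)).getD "").toList.map Char.toString)
  let bcdfRaw := PySem.Set.ofList (((digits.find? (fun d => PySem.Str.len d == 4)).getD "").toList.map Char.toString)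
  [("a", PySem.Set.diff acfRaw cfRaw), ("cf", cfRaw), ("bd", PySem.Set.diff bcdfRaw cfRaw)]

-- ===== PORT B =====
-- one pass: by_len[n] = set(d) for the FIRST d of each length n; the .getD [] default is
-- never used on Pre_ (Python raises KeyError exactly when the key is absent — excluded by Pre_).
def deduce_from_147_alt (digits : List String) : List (String × List String) :=
  let byLen := digits.foldl
    (fun bl d =>
      let n := PySem.Str.len d
      if bl.contains n then bl
      else bl.insert n (PySem.Set.ofList (d.toList.map Char.toString)))
    (PySem.Dict.empty (κ := Int) (ν := List String))
  let cf := byLen.getD 2 []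
  [("a", PySem.Set.diff (byLen.getD 3 []) cf), ("cf", cf), ("bd", PySem.Set.diff (byLen.getD 4 []) cf)]

-- ===== PRECONDITION & SPEC =====
-- Pre_ excludes exactly the inputs with no pattern of length 2, 3 or 4, on which A raises
-- StopIteration (and B raises KeyError).
def Pre_deduce_from_147 (digits : List String) : Prop :=
  (digits.any (fun d => PySem.Str.len d == 2)) = true ∧
  (digits.any (fun d => PySem.Str.len d == 3)) = true ∧
  (digits.any (fun d => PySem.Str.len d == 4)) = true
instance (digits : List String) : Decidable (Pre_deduce_from_147 digits) := by
  unfold Pre_deduce_from_147; infer_instance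
def pvWitness_deduce_from_147 : List String := ["cf", "acf", "bcdf"]

def Spec_deduce_from_147 (digits : List String) (out : List (String × List String)) : Prop := out = deduce_from_147_alt digits
instance (digits : List String) (out : List (String × List String)) : Decidable (Spec_deduce_from_147 digits out) := by unfold Spec_deduce_from_147; infer_instance

-- ===== CLAIM (what is proved, stated in full; the proofs are below) =====
def Claim_equal_deduce_from_147 : Prop := ∀ (digits : List String), Dom_deduce_from_147 digits → Pre_deduce_from_147 digits → Spec_deduce_from_147 digits (deduce_from_147 digits)

-- ===== LEMMAS AND PROOFS =====

-- invariant of B's single pass: the dict holds, for each length, the set of the FIRST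
-- pattern of that length (i.e. exactly what A's `next` searches produce)
lemma byLen_get? (l : List String) (bl : PySem.Dict Int (List String)) (n : Int) :
    (l.foldl
      (fun bl d =>
        let m := PySem.Str.len d
        if bl.contains m then bl
        else bl.insert m (PySem.Set.ofList (d.toList.map Char.toString))) bl).get? n =
    if bl.contains n then bl.get? n
    else (l.find? (fun d => PySem.Str.len d == n)).map
      (fun d => PySem.Set.ofList (d.toList.map Char.toString)) := by
  induction l generalizing bl with
  | nil =>
      simp only [List.foldl_nil, List.find?_nil, Option.map_none]
      split_ifs with h
      · rfl
      · exact (PySem.Dict.get?_eq_none_iff_contains _ _).mpr (by simpa using h)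
  | cons s l ih =>
      rw [List.foldl_cons]
      by_cases hc : bl.contains (PySem.Str.len s) = true
      · rw [if_pos hc, ih]
        by_cases hb : bl.contains n = true
        · rw [if_pos hb, if_pos hb]
        · have hns : PySem.Str.len s ≠ n := fun h => hb (h ▸ hc)
          rw [if_neg hb, if_neg hb,
            List.find?_cons_of_neg (by simpa using hns)]
      · rw [if_neg hc, ih]
        by_cases hn : PySem.Str.len s = n
        · subst hn
          rw [if_pos (by rw [PySem.Dict.contains_insert]; simp),
            PySem.Dict.get?_insert_self, if_neg hc,
            List.find?_cons_of_pos (by simp), Option.map_some]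
        · have hci : ((bl.insert (PySem.Str.len s)
              (PySem.Set.ofList (s.toList.map Char.toString))).contains n) = bl.contains n := by
            rw [PySem.Dict.contains_insert, beq_eq_false_iff_ne.mpr (fun h => hn h.symm),
              Bool.false_or]
          rw [hci, List.find?_cons_of_neg (by simpa using hn)]
          by_cases hb : bl.contains n = true
          · rw [if_pos hb, if_pos hb, PySem.Dict.get?_insert_of_ne]
            exact fun h => hn h.symm
          · rw [if_neg hb, if_neg hb]

lemma byLen_getD (digits : List String) (n : Int) :
    (digits.foldl
      (fun bl d =>
        let m := PySem.Str.len d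
        if bl.contains m then bl
        else bl.insert m (PySem.Set.ofList (d.toList.map Char.toString)))
      (PySem.Dict.empty (κ := Int) (ν := List String))).getD n [] =
    ((digits.find? (fun d => PySem.Str.len d == n)).map
      (fun d => PySem.Set.ofList (d.toList.map Char.toString))).getD [] := by
  rw [PySem.Dict.getD_eq_get?_getD, byLen_get?]
  simp [PySem.Dict.contains_empty]

-- ===== VERDICT (by name: the statement is the Claim_ definition above) =====
theorem deduce_from_147_spec : Claim_equal_deduce_from_147 := by
  intro digits _ hpre
  obtain ⟨h2, h3, h4⟩ := hpre
  unfold Spec_deduce_from_147 deduce_from_147 deduce_from_147_alt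
  simp only [byLen_getD]
  obtain ⟨d2, _, hd2⟩ := (List.any_eq_true).mp h2
  obtain ⟨d3, _, hd3⟩ := (List.any_eq_true).mp h3
  obtain ⟨d4, _, hd4⟩ := (List.any_eq_true).mp h4
  have f2 : (digits.find? (fun d => PySem.Str.len d == 2)).isSome := by
    rw [List.find?_isSome]; exact ⟨d2, by assumption, hd2⟩
  have f3 : (digits.find? (fun d => PySem.Str.len d == 3)).isSome := by
    rw [List.find?_isSome]; exact ⟨d3, by assumption, hd3⟩
  have f4 : (digits.find? (fun d => PySem.Str.len d == 4)).isSome := by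
    rw [List.find?_isSome]; exact ⟨d4, by assumption, hd4⟩
  obtain ⟨a2, ha2⟩ := Option.isSome_iff_exists.mp f2
  obtain ⟨a3, ha3⟩ := Option.isSome_iff_exists.mp f3
  obtain ⟨a4, ha4⟩ := Option.isSome_iff_exists.mp f4
  rw [ha2, ha3, ha4]
  simp
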